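-- pv_equiv track=rewrite | github.com/welfare-state-analytics/concept-history | pyscripts/gibbs.py | rareWords
-- ===== SOURCE A (Python) =====
-- from collections import Counter
--
-- def rareWords(doc, w, thresh=5):
--     c = Counter(w)
--     rare_words = set([key for key, value in c.items() if value < thresh])
--
--     idx= []
--     for i in range(len(w)):
--         if w[i] not in rare_words:
--             idx.append(i)
--
--     w = [w[i] for i in idx]
--     doc = [doc[i] for i in idx]
--
--     return(doc, w)
-- ===== SOURCE B (Python) =====
-- def rareWords(doc, w, thresh=5):
--     # Inverted index: word -> list of positions, built once.
--     pos = {}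
--     for i, x in enumerate(w):
--         pos.setdefault(x, []).append(i)
--     # Keep whole groups of frequent words, restore original order by sorting indices.
--     keep = sorted(i for idxs in pos.values() if len(idxs) >= thresh for i in idxs)
--     return ([doc[i] for i in keep], [w[i] for i in keep])
-- ===== Notes on version B (the rewrite author's own statement) =====
-- stated objective: alternative
-- what changed: B replaces A's Counter + rare-word set + index-filter passes by an inverted index (word -> list of positions): whole position groups of frequent words are kept at once and the collected indices are sorted to restore document order.
import Mathlib
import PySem

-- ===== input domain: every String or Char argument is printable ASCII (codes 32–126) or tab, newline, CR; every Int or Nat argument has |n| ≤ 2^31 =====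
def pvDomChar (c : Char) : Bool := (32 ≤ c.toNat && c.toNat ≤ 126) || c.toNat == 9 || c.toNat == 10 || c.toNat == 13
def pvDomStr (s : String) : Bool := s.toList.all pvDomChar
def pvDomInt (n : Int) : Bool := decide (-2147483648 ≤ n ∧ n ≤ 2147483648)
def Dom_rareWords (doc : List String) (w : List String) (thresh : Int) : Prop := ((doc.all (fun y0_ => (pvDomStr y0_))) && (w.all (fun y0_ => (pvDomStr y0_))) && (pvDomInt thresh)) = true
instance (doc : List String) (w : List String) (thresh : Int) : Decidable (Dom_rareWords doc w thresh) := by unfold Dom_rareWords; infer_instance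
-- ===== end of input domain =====

-- B replaces A's Counter/rare-set/index-filter passes by an inverted index (word -> positions):
-- whole groups of frequent words are kept and the indices sorted back into order; objective: alternative.

-- ===== PORT A =====
-- doc[i]/w[i] are ported with pyGetD; Pre_rareWords excludes exactly the inputs where
-- Python's doc[i] raises IndexError (w[i] is always in range: i ∈ range(len(w))).
def rareWords (doc : List String) (w : List String) (thresh : Int) : List String × List String :=
  let c := PySem.Dict.counter w
  let rare_words : PySem.Set String :=
    PySem.Set.ofList (c.items.filterMap (fun kv => if kv.2 < thresh then some kv.1 else none))
  let idx := (PySem.List.pyRange 0 (w.length : Int) 1).foldl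
    (fun acc i => if PySem.List.pyGetD w i "" ∈ rare_words then acc else acc ++ [i]) []
  let w' := idx.map (fun i => PySem.List.pyGetD w i "")
  let doc' := idx.map (fun i => PySem.List.pyGetD doc i "")
  (doc', w')

-- ===== PORT B =====
-- pos.setdefault(x, []).append(i) is Dict.modify x [] (· ++ [i]); sorted(...) with no key
-- is PySem.List.sorted with the identity key.
def rareWords_alt (doc : List String) (w : List String) (thresh : Int) : List String × List String :=
  let pos := (PySem.List.enumerate w).foldl
    (fun d p => d.modify p.2 [] (fun l => l ++ [p.1])) PySem.Dict.empty
  let keep := PySem.List.sorted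
    ((pos.values.filter (fun idxs => decide (thresh ≤ (idxs.length : Int)))).flatten)
    (fun i => i) false
  (keep.map (fun i => PySem.List.pyGetD doc i ""),
   keep.map (fun i => PySem.List.pyGetD w i ""))

-- ===== PRECONDITION & SPEC =====
-- Pre_ excludes exactly the inputs on which Python A raises IndexError: a kept index
-- (one whose word reaches the threshold) that is beyond len(doc).
def Pre_rareWords (doc : List String) (w : List String) (thresh : Int) : Prop :=
  ∀ i ∈ List.range w.length, thresh ≤ (w.count (w.getD i "") : Int) → i < doc.length
instance (doc : List String) (w : List String) (thresh : Int) : Decidable (Pre_rareWords doc w thresh) := by unfold Pre_rareWords; infer_instance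
def pvWitness_rareWords : List String × List String × Int := (["x", "y", "z"], ["a", "b", "a"], 2)
def Spec_rareWords (doc : List String) (w : List String) (thresh : Int) (out : List String × List String) : Prop := out = rareWords_alt doc w thresh
instance (doc : List String) (w : List String) (thresh : Int) (out : List String × List String) : Decidable (Spec_rareWords doc w thresh out) := by unfold Spec_rareWords; infer_instance

-- ===== CLAIM (what is proved, stated in full; the proofs are below) =====
def Claim_equal_rareWords : Prop := ∀ (doc : List String) (w : List String) (thresh : Int), Dom_rareWords doc w thresh → Pre_rareWords doc w thresh → Spec_rareWords doc w thresh (rareWords doc w thresh)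

-- ===== LEMMAS AND PROOFS =====

-- membership in A's rare_words set, for a word actually occurring in w
theorem mem_rare_iff (w : List String) (thresh : Int) (x : String) (hx : x ∈ w) :
    x ∈ PySem.Set.ofList (((PySem.Dict.counter w).items).filterMap
        (fun kv => if kv.2 < thresh then some kv.1 else none))
      ↔ ((w.count x : Int) < thresh) := by
  simp only [PySem.Set.mem_ofList, PySem.Dict.items_counter, List.mem_filterMap, List.mem_map]
  constructor
  · rintro ⟨kv, ⟨k, hk, rfl⟩, hsome⟩
    split at hsome
    · next h => cases hsome; simpa using h
    · exact absurd hsome (by simp)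
  · intro hlt
    exact ⟨(x, (w.count x : Int)), ⟨x, hx, rfl⟩, by simp [hlt]⟩

-- 'if p(i): skip else: idx.append(i)' is a filter by ¬p
theorem foldl_skip_filter {α : Type} (p : α → Prop) [DecidablePred p]
    (l : List α) (acc : List α) :
    l.foldl (fun acc i => if p i then acc else acc ++ [i]) acc
      = acc ++ l.filter (fun i => decide (¬ p i)) := by
  induction l generalizing acc with
  | nil => simp
  | cons x xs ih =>
    by_cases hp : p x
    · simp [hp, ih]
    · simp [hp, ih]

-- B's inverted index: the group of a word x is the list of positions of x, in order.
theorem pos_getD (w : List String) (x : String) :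
    ((PySem.List.enumerate w).foldl
        (fun d p => d.modify p.2 [] (fun l => l ++ [p.1])) PySem.Dict.empty).getD x []
      = (((PySem.List.enumerate w).filter (fun p => p.2 == x)).map (fun p => p.1)) := by
  have h : (PySem.List.enumerate w).foldl
        (fun d p => d.modify p.2 [] (fun l => l ++ [p.1])) PySem.Dict.empty
      = ((PySem.List.enumerate w).map (fun p => (p.2, p.1))).foldl
        (fun d q => d.modify q.1 [] (fun l => l ++ [q.2])) PySem.Dict.empty := by
    rw [List.foldl_map]
  rw [h, PySem.Dict.getD_foldl_modify_append]
  simp [List.filter_map, List.map_map, Function.comp_def]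

theorem pos_keys (w : List String) :
    ((PySem.List.enumerate w).foldl
        (fun d p => d.modify p.2 [] (fun l => l ++ [p.1])) PySem.Dict.empty).keys
      = PySem.Set.ofList w := by
  rw [PySem.Dict.keys_foldl_modify_key]
  simp [PySem.List.map_snd_enumerate, PySem.Dict.keys_empty]
  rfl

-- the group of a word x in B's inverted index: the positions of x, in order
def pvGrp (w : List String) (x : String) : List Int :=
  ((PySem.List.enumerate w).filter (fun p => p.2 == x)).map (fun p => p.1)

theorem pvGrp_mem (w : List String) (x : String) (i : Int) :
    i ∈ pvGrp w x ↔ ∃ (k : Nat) (h : k < w.length), i = (k : Int) ∧ w[k] = x := by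
  simp only [pvGrp, List.mem_map, List.mem_filter]
  constructor
  · rintro ⟨p, ⟨hp, hx⟩, rfl⟩
    rcases (PySem.List.mem_enumerate_iff _ _ _).mp hp with ⟨k, h, rfl⟩
    exact ⟨k, h, by simp, by simpa using hx⟩
  · rintro ⟨k, h, rfl, hx⟩
    exact ⟨((k : Int), w[k]), ⟨(PySem.List.mem_enumerate_iff _ _ _).mpr ⟨k, h, by simp⟩, by simp [hx]⟩, rfl⟩

theorem countP_enumerate (w : List String) (x : String) (s : Int) :
    (PySem.List.enumerate w s).countP (fun p => p.2 == x) = w.count x := by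
  induction w generalizing s with
  | nil => simp [PySem.List.enumerate_nil]
  | cons y ys ih =>
    rw [PySem.List.enumerate_cons, List.countP_cons, ih, List.count_cons]

theorem pvGrp_len (w : List String) (x : String) : (pvGrp w x).length = w.count x := by
  simp only [pvGrp, List.length_map, ← List.countP_eq_length_filter]
  exact countP_enumerate w x 0

theorem pvGrp_pairwise (w : List String) (x : String) : (pvGrp w x).Pairwise (· < ·) :=
  List.pairwise_map.mpr ((PySem.List.pairwise_lt_enumerate w 0).filter _)

theorem pvGrp_nodup (w : List String) (x : String) : (pvGrp w x).Nodup :=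
  (pvGrp_pairwise w x).imp ne_of_lt

theorem pvGrp_disjoint (w : List String) (x y : String) (hxy : x ≠ y) :
    List.Disjoint (pvGrp w x) (pvGrp w y) := by
  intro i hix hiy
  rcases (pvGrp_mem w x i).mp hix with ⟨k, hk, hik, hkx⟩
  rcases (pvGrp_mem w y i).mp hiy with ⟨k', hk', hik', hky⟩
  have : k = k' := by omega
  subst this
  exact hxy (hkx ▸ hky)

-- B's kept-groups-then-sort equals A's index filter
theorem keep_eq (w : List String) (thresh : Int) :
    PySem.List.sorted
      (((((PySem.List.enumerate w).foldl
          (fun d p => d.modify p.2 [] (fun l => l ++ [p.1])) PySem.Dict.empty).values.filter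
            (fun idxs => decide (thresh ≤ (idxs.length : Int)))).flatten))
      (fun i => i) false
    = (PySem.List.pyRange 0 (w.length : Int) 1).filter
        (fun i => decide (thresh ≤ (w.count (PySem.List.pyGetD w i "") : Int))) := by
  have hkeys := pos_keys w
  have hnd : ((PySem.List.enumerate w).foldl
      (fun d p => d.modify p.2 [] (fun l => l ++ [p.1])) PySem.Dict.empty).keys.Nodup := by
    rw [hkeys]; exact PySem.Set.nodup_ofList w
  have hvals := PySem.Dict.values_eq_map_keys _ hnd ([] : List Int)
  have hg : (fun k => ((PySem.List.enumerate w).foldl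
      (fun d p => d.modify p.2 [] (fun l => l ++ [p.1])) PySem.Dict.empty).getD k []) = pvGrp w :=
    funext fun x => pos_getD w x
  rw [hvals, hkeys, hg, List.filter_map]
  -- now: sorted ((kept.map (pvGrp w)).flatten) = idxF with kept a filter of Set.ofList w
  apply PySem.List.sorted_eq_of_perm_of_pairwise_lt
  · -- idxF.Perm flat
    have hndF : ((PySem.List.pyRange 0 (w.length : Int) 1).filter
        (fun i => decide (thresh ≤ (w.count (PySem.List.pyGetD w i "") : Int)))).Nodup :=
      (PySem.List.nodup_pyRange_one 0 (w.length : Int)).filter _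
    have hndFl : ((((PySem.Set.ofList w).filter
        ((fun idxs => decide (thresh ≤ (idxs.length : Int))) ∘ pvGrp w)).map (pvGrp w)).flatten).Nodup := by
      refine List.nodup_flatten.mpr ⟨?_, ?_⟩
      · intro l hl
        rcases List.mem_map.mp hl with ⟨x, _, rfl⟩
        exact pvGrp_nodup w x
      · refine List.pairwise_map.mpr ?_
        refine List.Pairwise.imp ?_ (((PySem.Set.nodup_ofList w).filter _))
        exact fun h => pvGrp_disjoint w _ _ h
    refine (List.perm_ext_iff_of_nodup hndF hndFl).mpr ?_
    intro a
    simp only [List.mem_filter, List.mem_flatten, List.mem_map, PySem.List.mem_pyRange_one,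
      Function.comp_apply, decide_eq_true_eq]
    constructor
    · rintro ⟨⟨h0, hlt⟩, hc⟩
      have hk : a.toNat < w.length := by omega
      refine ⟨pvGrp w w[a.toNat], ⟨w[a.toNat], ⟨(PySem.Set.mem_ofList _ _).mpr (List.getElem_mem hk), ?_⟩, rfl⟩, ?_⟩
      · rw [pvGrp_len]
        rwa [PySem.List.pyGetD_eq_getElem w "" h0 hlt] at hc
      · exact (pvGrp_mem w _ a).mpr ⟨a.toNat, hk, by omega, rfl⟩
    · rintro ⟨l, ⟨x, ⟨hxw, hcnt⟩, rfl⟩, ha⟩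
      rcases (pvGrp_mem w x a).mp ha with ⟨k, hk, rfl, hkx⟩
      have h0 : (0 : Int) ≤ (k : Int) := by omega
      have hlt : ((k : Int)) < (w.length : Int) := by omega
      refine ⟨⟨h0, hlt⟩, ?_⟩
      rw [PySem.List.pyGetD_eq_getElem w "" h0 hlt]
      simp only [Int.toNat_natCast]
      rw [hkx, ← pvGrp_len w x]
      exact hcnt
  · exact (PySem.List.pairwise_lt_pyRange_one 0 (w.length : Int)).filter _

theorem rareWords_spec : Claim_equal_rareWords := by
  intro doc w thresh _ _
  unfold Spec_rareWords
  simp only [rareWords, rareWords_alt]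
  rw [foldl_skip_filter, keep_eq]
  simp only [List.nil_append]
  have hfc : (PySem.List.pyRange 0 (w.length : Int) 1).filter
        (fun i => decide (¬ PySem.List.pyGetD w i "" ∈ PySem.Set.ofList
          (((PySem.Dict.counter w).items).filterMap
            (fun kv => if kv.2 < thresh then some kv.1 else none))))
      = (PySem.List.pyRange 0 (w.length : Int) 1).filter
        (fun i => decide (thresh ≤ (w.count (PySem.List.pyGetD w i "") : Int))) := by
    apply List.filter_congr
    intro i hi
    rcases (PySem.List.mem_pyRange_one).mp hi with ⟨h0, hlt⟩
    have hxmem : PySem.List.pyGetD w i "" ∈ w := by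
      have hh : i.toNat < w.length := by omega
      rw [PySem.List.pyGetD_eq_getElem w "" h0 hlt]
      exact List.getElem_mem hh
    have hiff := mem_rare_iff w thresh (PySem.List.pyGetD w i "") hxmem
    rw [decide_eq_decide, not_iff_comm, hiff]
    omega
  rw [hfc]
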